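-- pv_equiv track=rewrite | github.com/Kronos5781/LearningPython | Coding_Contest/genetic_drift.py | find_oriented_pairs
-- ===== SOURCE A (Python) =====
-- def find_oriented_pairs(input):
--     # Define Output Array
--     output = []
--
--     for i in range(len(input)):
--         for j in range(len(input)):
--             if j > i:  # Check if the numbers are consecutive
--                 if input[i] >= 0 and input[
--                     j] < 0:  # Check if One of the two Numbers is Negative (0 wird als positive Zahl gewertet)
--                     if input[i] - input[j] * -1 == -1 or input[i] - input[j] * -1 == 1:  # Check if |x| - |y| = +-1
--                         output.append((input[i], input[j], i, j))  # Append the Value to the list and the index in the input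
--
--                 elif input[i] < 0 and input[
--                     j] >= 0:  # Check if One of the two Numbers is Negative (0 wird als positive Zahl gewertet)
--                     if input[i] * -1 - input[j] == -1 or input[i] * -1 - input[j] == 1:  # Check if |x| - |y| = +-1
--                         output.append((input[i], input[j], i, j))  # Append the Value to the list and the index in the input
--     return output
-- ===== SOURCE B (Python) =====
-- def find_oriented_pairs(input):
--     # Bucket indices by value once, then look up only the two candidate
--     # opposite-sign values (|v|+-1) for each element.
--     buckets = {}
--     for j, w in enumerate(input):
--         buckets.setdefault(w, []).append(j)
--     output = []
--     for i, v in enumerate(input):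
--         if v >= 0:
--             cands = [w for w in (1 - v, -1 - v) if w < 0]
--         else:
--             cands = [-v - 1, -v + 1]
--         js = sorted(j for w in cands for j in buckets.get(w, []) if j > i)
--         output.extend((v, input[j], i, j) for j in js)
--     return output
-- ===== Notes on version B (the rewrite author's own statement) =====
-- stated objective: faster
-- what changed: Replaces A's nested O(n^2) all-pairs index scan by a single pass that buckets indices by value in a dict, then for each element looks up only the two candidate opposite-sign values |v|±1 and merges their (already increasing) index lists.
import Mathlib
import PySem

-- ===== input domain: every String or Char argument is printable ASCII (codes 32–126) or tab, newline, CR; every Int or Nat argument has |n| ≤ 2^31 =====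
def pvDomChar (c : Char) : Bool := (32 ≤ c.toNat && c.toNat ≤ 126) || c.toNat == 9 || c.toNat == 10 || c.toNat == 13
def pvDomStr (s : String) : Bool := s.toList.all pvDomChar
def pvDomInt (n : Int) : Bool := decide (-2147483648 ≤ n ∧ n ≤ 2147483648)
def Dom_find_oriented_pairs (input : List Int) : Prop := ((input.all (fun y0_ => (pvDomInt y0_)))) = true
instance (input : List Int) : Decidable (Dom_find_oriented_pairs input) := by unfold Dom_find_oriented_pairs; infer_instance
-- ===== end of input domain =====

-- B replaces A's O(n^2) double index scan by a one-pass index of positions per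
-- value plus, per element, lookups of the two candidate opposite-sign values.

-- ===== PORT A =====
def find_oriented_pairs (input : List Int) : List (Int × Int × Int × Int) :=
  (PySem.List.pyRange 0 (PySem.List.len input) 1).foldl (fun output i =>
    (PySem.List.pyRange 0 (PySem.List.len input) 1).foldl (fun output j =>
      if j > i then
        let vi := PySem.List.pyGetD input i 0
        let vj := PySem.List.pyGetD input j 0
        if vi ≥ 0 ∧ vj < 0 then
          if vi - vj * (-1) = -1 ∨ vi - vj * (-1) = 1 then
            output ++ [(vi, vj, i, j)]
          else output
        else if vi < 0 ∧ vj ≥ 0 then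
          if vi * (-1) - vj = -1 ∨ vi * (-1) - vj = 1 then
            output ++ [(vi, vj, i, j)]
          else output
        else output
      else output) output) []

-- ===== PORT B =====
-- buckets: value -> list of its indices, in increasing order
def fopBuckets (input : List Int) : PySem.Dict Int (List Int) :=
  (PySem.List.enumerate input).foldl
    (fun d p => d.modify p.2 [] (fun l => l ++ [p.1])) PySem.Dict.empty

-- the (at most two) opposite-sign values whose abs differs from |v| by one
def fopCands (v : Int) : List Int :=
  if v ≥ 0 then [1 - v, -1 - v].filter (fun w => w < 0) else [-v - 1, -v + 1]

def find_oriented_pairs_alt (input : List Int) : List (Int × Int × Int × Int) :=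
  let buckets := fopBuckets input
  (PySem.List.enumerate input).foldl (fun output p =>
    let i := p.1
    let v := p.2
    let js := PySem.List.sorted
      (((fopCands v).flatMap (fun w => buckets.getD w [])).filter (fun j => j > i))
      (fun x => x) false
    output ++ js.map (fun j => (v, PySem.List.pyGetD input j 0, i, j))) []

-- ===== PRECONDITION & SPEC =====
def Spec_find_oriented_pairs (input : List Int) (out : List (Int × Int × Int × Int)) : Prop := out = find_oriented_pairs_alt input
instance (input : List Int) (out : List (Int × Int × Int × Int)) : Decidable (Spec_find_oriented_pairs input out) := by unfold Spec_find_oriented_pairs; infer_instance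

-- ===== CLAIM (what is proved, stated in full; the proofs are below) =====
def Claim_equal_find_oriented_pairs : Prop := ∀ (input : List Int), Dom_find_oriented_pairs input → Spec_find_oriented_pairs input (find_oriented_pairs input)

-- ===== LEMMAS AND PROOFS =====

-- A's pair condition as a Boolean on the two values
def fopMatch (v w : Int) : Bool :=
  decide ((v ≥ 0 ∧ w < 0 ∧ (v - w * (-1) = -1 ∨ v - w * (-1) = 1)) ∨
          (v < 0 ∧ w ≥ 0 ∧ (v * (-1) - w = -1 ∨ v * (-1) - w = 1)))

lemma fopMatch_iff_mem_cands (v w : Int) :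
    fopMatch v w = true ↔ w ∈ fopCands v := by
  simp only [fopMatch, fopCands, decide_eq_true_eq]
  by_cases h : v ≥ 0 <;> simp [h, List.mem_filter] <;> omega

lemma fopCands_nodup (v : Int) : (fopCands v).Nodup := by
  unfold fopCands
  split
  · apply List.Nodup.filter
    simp only [List.nodup_cons, List.mem_singleton, List.not_mem_nil, not_false_iff, List.nodup_nil, and_true]
    omega
  · simp only [List.nodup_cons, List.mem_singleton, List.not_mem_nil, not_false_iff, List.nodup_nil, and_true]
    omega

-- pointwise-disjoint tests: filter (p || q) is a permutation of filter p ++ filter q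
lemma filter_or_perm {α : Type} (S : List α) (p q : α → Bool)
    (h : ∀ x, ¬(p x = true ∧ q x = true)) :
    (S.filter (fun x => p x || q x)).Perm (S.filter p ++ S.filter q) := by
  induction S with
  | nil => simp
  | cons x S ih =>
    by_cases hp : p x = true
    · have hq : q x = false := by
        cases hqx : q x
        · rfl
        · exact absurd ⟨hp, hqx⟩ (h x)
      simpa [List.filter_cons, hp, hq] using ih.cons x
    · have hp' : p x = false := by simpa using hp
      cases hq : q x
      · simpa [List.filter_cons, hp', hq] using ih
      · simp only [List.filter_cons, hp', hq, Bool.false_or]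
        exact (ih.cons x).trans (List.perm_middle).symm

-- flatMap of per-value filters is a permutation of one filter by membership
lemma flatMap_filter_perm {α : Type} [DecidableEq α] (S : List α) (cs : List α)
    (hnd : cs.Nodup) (g : α → α) :
    (cs.flatMap (fun w => S.filter (fun j => g j == w))).Perm
      (S.filter (fun j => cs.contains (g j))) := by
  induction cs with
  | nil => simp
  | cons c cs ih =>
    have hnd' := hnd.of_cons
    have hc : c ∉ cs := by simp at hnd; exact hnd.1
    have key : (S.filter (fun j => (c :: cs).contains (g j))).Perm
        (S.filter (fun j => g j == c) ++ S.filter (fun j => cs.contains (g j))) := by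
      have := filter_or_perm S (fun j => g j == c) (fun j => cs.contains (g j))
        (by intro x ⟨h1, h2⟩; simp at h1 h2; exact hc (h1 ▸ h2))
      simpa using this
    simpa using (((ih hnd').append_left (S.filter (fun j => g j == c))).trans key.symm)

-- the bucket for value w holds exactly the indices carrying w, in order
lemma fopBuckets_getD (input : List Int) (w : Int) :
    (fopBuckets input).getD w [] =
      ((PySem.List.enumerate input).filter (fun p => p.2 == w)).map (·.1) := by
  unfold fopBuckets
  have h : (PySem.List.enumerate input).foldl
        (fun d p => d.modify p.2 [] (fun l => l ++ [p.1])) PySem.Dict.empty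
      = ((PySem.List.enumerate input).map (fun p => (p.2, p.1))).foldl
        (fun d p => d.modify p.1 [] (fun l => l ++ [p.2])) PySem.Dict.empty := by
    rw [List.foldl_map]
  rw [h, PySem.Dict.getD_foldl_modify_append]
  simp [List.filter_map, Function.comp_def]

-- the bucket as a filtered index range
lemma fopBuckets_getD' (input : List Int) (w : Int) :
    (fopBuckets input).getD w [] =
      (PySem.List.pyRange 0 (PySem.List.len input) 1).filter
        (fun j => PySem.List.pyGetD input j 0 == w) := by
  rw [fopBuckets_getD, PySem.List.enumerate_eq_map_pyRange input 0, List.filter_map]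
  simp [Function.comp_def]

-- characterization of A as a flatMap over the index range
lemma find_oriented_pairs_eq_flatMap (input : List Int) :
    find_oriented_pairs input =
      (PySem.List.pyRange 0 (PySem.List.len input) 1).flatMap (fun i =>
        ((PySem.List.pyRange 0 (PySem.List.len input) 1).filter
            (fun j => decide (j > i) && fopMatch (PySem.List.pyGetD input i 0) (PySem.List.pyGetD input j 0))).map
          (fun j => (PySem.List.pyGetD input i 0, PySem.List.pyGetD input j 0, i, j))) := by
  unfold find_oriented_pairs
  refine (PySem.List.foldl_congr_mem _ _
      (fun output i => output ++
        ((PySem.List.pyRange 0 (PySem.List.len input) 1).filter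
            (fun j => decide (j > i) && fopMatch (PySem.List.pyGetD input i 0) (PySem.List.pyGetD input j 0))).map
          (fun j => (PySem.List.pyGetD input i 0, PySem.List.pyGetD input j 0, i, j))) _ ?_).trans ?_
  · intro acc i _
    refine (PySem.List.foldl_congr_mem _ _
        (fun acc j => if (decide (j > i) && fopMatch (PySem.List.pyGetD input i 0) (PySem.List.pyGetD input j 0)) = true
          then acc ++ [(PySem.List.pyGetD input i 0, PySem.List.pyGetD input j 0, i, j)] else acc) _ ?_).trans
      (PySem.List.foldl_append_if _ _ _ _)
    intro acc2 j _
    dsimp only [fopMatch]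
    split_ifs <;> simp_all <;> omega
  · rw [PySem.List.foldl_append_eq_flatMap]
    simp

-- characterization of B as the same flatMap
lemma find_oriented_pairs_alt_eq_flatMap (input : List Int) :
    find_oriented_pairs_alt input =
      (PySem.List.pyRange 0 (PySem.List.len input) 1).flatMap (fun i =>
        ((PySem.List.pyRange 0 (PySem.List.len input) 1).filter
            (fun j => decide (j > i) && fopMatch (PySem.List.pyGetD input i 0) (PySem.List.pyGetD input j 0))).map
          (fun j => (PySem.List.pyGetD input i 0, PySem.List.pyGetD input j 0, i, j))) := by
  unfold find_oriented_pairs_alt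
  rw [PySem.List.foldl_append_eq_flatMap, PySem.List.enumerate_eq_map_pyRange input 0,
    List.flatMap_map]
  simp only [List.nil_append]
  congr 1
  funext i
  congr 1
  -- the sorted filtered bucket union equals the increasing filtered range
  apply PySem.List.sorted_eq_of_perm_of_pairwise_lt
  · have hxs : (((fopCands (PySem.List.pyGetD input i 0)).flatMap
          (fun w => (fopBuckets input).getD w [])).filter (fun j => decide (j > i)))
        = (fopCands (PySem.List.pyGetD input i 0)).flatMap
            (fun w => ((PySem.List.pyRange 0 (PySem.List.len input) 1).filter
              (fun j => decide (j > i))).filter (fun j => PySem.List.pyGetD input j 0 == w)) := by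
      rw [List.filter_flatMap]
      congr 1
      funext w
      rw [fopBuckets_getD', List.filter_filter, List.filter_filter]
      congr 1
      funext j
      rw [Bool.and_comm]
    have hys : ((PySem.List.pyRange 0 (PySem.List.len input) 1).filter
          (fun j => decide (j > i) && fopMatch (PySem.List.pyGetD input i 0) (PySem.List.pyGetD input j 0)))
        = ((PySem.List.pyRange 0 (PySem.List.len input) 1).filter
            (fun j => decide (j > i))).filter
          (fun j => (fopCands (PySem.List.pyGetD input i 0)).contains (PySem.List.pyGetD input j 0)) := by
      rw [List.filter_filter]
      apply List.filter_congr
      intro j _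
      rw [Bool.and_comm]
      congr 1
      rw [Bool.eq_iff_iff, List.contains_iff_mem, fopMatch_iff_mem_cands]
    rw [hys, hxs]
    exact (flatMap_filter_perm _ _ (fopCands_nodup _) _).symm
  · exact (PySem.List.pairwise_lt_pyRange_one 0 (PySem.List.len input)).filter _

-- ===== VERDICT (by name: the statement is the Claim_ definition above) =====
theorem find_oriented_pairs_spec : Claim_equal_find_oriented_pairs := by
  intro input _
  unfold Spec_find_oriented_pairs
  rw [find_oriented_pairs_eq_flatMap, find_oriented_pairs_alt_eq_flatMap]
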